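-- pv_equiv track=rewrite | github.com/enometa820/enometa-shorts | scripts/sequence_generators.py | norgard
-- ===== SOURCE A (Python) =====
-- def norgard(n: int) -> list:
--     """Nørgård Infinity Series: s(0)=0, s(2k)=-s(k), s(2k+1)=s(k)+1."""
--     if n <= 0:
--         return []
--     s = [0] * max(n, 2)
--     s[0] = 0
--     if n > 1:
--         s[1] = 1
--     for i in range(2, n):
--         if i % 2 == 0:
--             s[i] = -s[i // 2]
--         else:
--             s[i] = s[(i - 1) // 2] + 1
--     return s[:n]
-- ===== SOURCE B (Python) =====
-- def norgard(n: int) -> list: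
--     """Norgard Infinity Series: each term computed directly from its index's binary digits."""
--     if n <= 0:
--         return []
--     out = []
--     for i in range(n):
--         v = 0
--         for b in bin(i)[2:]:
--             v = v + 1 if b == '1' else -v
--         out.append(v)
--     return out
-- ===== Notes on version B (the rewrite author's own statement) =====
-- stated objective: alternative
-- what changed: Replaces the memoized prefix array (each term from earlier terms) with an independent per-index most-significant-first scan of the index's binary digits, appending each term as it is computed.
import Mathlib
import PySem

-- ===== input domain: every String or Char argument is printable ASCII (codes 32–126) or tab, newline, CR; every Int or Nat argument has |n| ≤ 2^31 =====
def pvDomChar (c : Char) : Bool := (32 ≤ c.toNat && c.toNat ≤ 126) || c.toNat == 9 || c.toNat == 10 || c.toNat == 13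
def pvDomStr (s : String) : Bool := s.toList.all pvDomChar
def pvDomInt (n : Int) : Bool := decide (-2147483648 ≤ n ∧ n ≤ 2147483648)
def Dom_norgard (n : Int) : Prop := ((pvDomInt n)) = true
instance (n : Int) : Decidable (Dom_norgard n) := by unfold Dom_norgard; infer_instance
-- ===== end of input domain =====

-- B computes each term independently from its index's binary digits (MSB-first scan)
-- instead of A's memoized prefix array; alternative decomposition, same return value.


-- ===== PORT A =====
-- body of A's 'for i in range(2, n)' loop
def norgardStep (s : List Int) (i : Int) : List Int :=
  if PySem.Int.mod i 2 == 0 then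
    PySem.List.pySetD s i (-(PySem.List.pyGetD s (PySem.Int.floordiv i 2) 0))
  else
    PySem.List.pySetD s i ((PySem.List.pyGetD s (PySem.Int.floordiv (i - 1) 2) 0) + 1)

def norgard (n : Int) : List Int :=
  if n ≤ 0 then []
  else
    let s0 := List.replicate (max n 2).toNat (0 : Int)
    let s1 := PySem.List.pySetD s0 0 0
    let s2 := if n > 1 then PySem.List.pySetD s1 1 1 else s1
    let s3 := (PySem.List.pyRange 2 n 1).foldl norgardStep s2
    PySem.List.slice s3 none (some n)

-- ===== PORT B =====
-- bin(i)[2:] for i ≥ 1 (binary digits, most significant first); hand-ported, exact for i ≥ 1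
def pyBinCore : Nat → List Char
  | 0 => []
  | (k + 1) => pyBinCore ((k + 1) / 2) ++ [if (k + 1) % 2 = 1 then '1' else '0']
  decreasing_by exact Nat.div_lt_self (Nat.succ_pos k) (by omega)

-- bin(i)[2:] (Python renders bin(0)[2:] as "0"); exact for all i ≥ 0
def pyBin (i : Nat) : List Char := if i = 0 then ['0'] else pyBinCore i

def norgard_alt (n : Int) : List Int :=
  if n ≤ 0 then []
  else (List.range n.toNat).map (fun i =>
    (pyBin i).foldl (fun v b => if b = '1' then v + 1 else -v) 0)

-- ===== PRECONDITION & SPEC =====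
def Spec_norgard (n : Int) (out : List Int) : Prop := out = norgard_alt n
instance (n : Int) (out : List Int) : Decidable (Spec_norgard n out) := by unfold Spec_norgard; infer_instance

-- ===== CLAIM (what is proved, stated in full; the proofs are below) =====
def Claim_equal_norgard : Prop := ∀ (n : Int), Dom_norgard n → Spec_norgard n (norgard n)

-- ===== LEMMAS AND PROOFS =====

-- the mathematical Nørgård sequence both ports compute
def nf : Nat → Int
  | 0 => 0
  | (k + 1) =>
    if (k + 1) % 2 = 0 then -(nf ((k + 1) / 2)) else nf ((k + 1) / 2) + 1
  decreasing_by all_goals exact Nat.div_lt_self (Nat.succ_pos k) (by omega)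

lemma nf_zero : nf 0 = 0 := by simp [nf]
lemma nf_one : nf 1 = 1 := by simp [nf]

lemma foldl_pyBinCore (i : Nat) :
    (pyBinCore i).foldl (fun v b => if b = '1' then v + 1 else -v) 0 = nf i := by
  induction i using Nat.strong_induction_on with
  | _ i ih =>
    match i with
    | 0 => simp [pyBinCore, nf]
    | (k + 1) =>
      rw [pyBinCore, List.foldl_append, ih ((k + 1) / 2) (Nat.div_lt_self (Nat.succ_pos k) (by omega))]
      by_cases h : (k + 1) % 2 = 1
      · simp [h, nf]
      · have h0 : (k + 1) % 2 = 0 := by omega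
        simp [h0, nf]

lemma foldl_pyBin (i : Nat) :
    (pyBin i).foldl (fun v b => if b = '1' then v + 1 else -v) 0 = nf i := by
  by_cases h : i = 0
  · simp [pyBin, h, nf]
  · rw [pyBin, if_neg h, foldl_pyBinCore]

lemma norgard_alt_eq_map (n : Int) (h : ¬ n ≤ 0) :
    norgard_alt n = (List.range n.toNat).map nf := by
  rw [norgard_alt, if_neg h]
  exact List.map_congr_left (fun i _ => foldl_pyBin i)

lemma floordiv_natCast_two (a : Nat) :
    PySem.Int.floordiv (a : Int) 2 = ((a / 2 : Nat) : Int) := by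
  exact_mod_cast PySem.Int.floordiv_natCast a 2

lemma mod_natCast_two (a : Nat) :
    PySem.Int.mod (a : Int) 2 = ((a % 2 : Nat) : Int) := by
  exact_mod_cast PySem.Int.mod_natCast a 2

lemma nf_succ (m : Nat) :
    nf (m + 1) = if (m + 1) % 2 = 0 then -(nf ((m + 1) / 2)) else nf ((m + 1) / 2) + 1 := by
  rw [nf]

lemma getD_set_self (xs : List Int) (i : Nat) (h : i < xs.length) (v : Int) :
    (xs.set i v).getD i 0 = v := by
  simp [List.getD_eq_getElem?_getD, h]

lemma getD_set_ne (xs : List Int) (i j : Nat) (h : i ≠ j) (v : Int) :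
    (xs.set i v).getD j 0 = xs.getD j 0 := by
  simp [List.getD_eq_getElem?_getD, h]

lemma norgard_inv (s2 : List Int) (M : Nat) (hlen : s2.length = M)
    (h0 : s2.getD 0 0 = nf 0) (h1 : s2.getD 1 0 = nf 1) :
    ∀ k : Nat, 2 + k ≤ M →
      (((List.range k).map (fun j : Nat => ((2 : Int) + j))).foldl norgardStep s2).length = M ∧
      ∀ j : Nat, j < 2 + k →
        (((List.range k).map (fun j : Nat => ((2 : Int) + j))).foldl norgardStep s2).getD j 0 = nf j := by
  intro k
  induction k with
  | zero =>
    intro _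
    refine ⟨hlen, fun j hj => ?_⟩
    interval_cases j <;> assumption
  | succ k ih =>
    intro hk
    obtain ⟨ihl, ihv⟩ := ih (by omega)
    rw [List.range_succ, List.map_append, List.foldl_append]
    set t := ((List.range k).map (fun j : Nat => ((2 : Int) + j))).foldl norgardStep s2 with ht
    simp only [List.map_cons, List.map_nil, List.foldl_cons, List.foldl_nil]
    have hcast : (2 : Int) + (k : Int) = ((2 + k : Nat) : Int) := by push_cast; ring
    have hlt : 2 + k < t.length := by omega
    have hhalf : (2 + k) / 2 < 2 + k := by omega
    have hval : norgardStep t ((2 : Int) + (k : Int)) = t.set (2 + k) (nf (2 + k)) := by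
      rw [hcast, norgardStep, mod_natCast_two]
      by_cases hpar : (2 + k) % 2 = 0
      · rw [if_pos (by simp [hpar]), floordiv_natCast_two, PySem.List.pyGetD_natCast,
          PySem.List.pySetD_natCast, ihv _ hhalf]
        have : nf (2 + k) = -(nf ((2 + k) / 2)) := by
          have h2 : 2 + k = (1 + k) + 1 := by omega
          rw [h2, nf_succ, if_pos (by omega)]
        rw [this]
      · rw [if_neg (by simp; omega)]
        have hc1 : ((2 + k : Nat) : Int) - 1 = ((1 + k : Nat) : Int) := by push_cast; ring
        rw [hc1, floordiv_natCast_two, PySem.List.pyGetD_natCast, PySem.List.pySetD_natCast,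
          ihv _ (by omega)]
        have : nf (2 + k) = nf ((1 + k) / 2) + 1 := by
          have h2 : 2 + k = (1 + k) + 1 := by omega
          have h3 : (2 + k) / 2 = (1 + k) / 2 := by omega
          rw [h2, nf_succ, if_neg (by omega)]
          rw [← h3, h2]
        rw [this]
    rw [hval]
    refine ⟨by simpa using ihl, fun j hj => ?_⟩
    by_cases hje : j = 2 + k
    · rw [hje, getD_set_self t (2 + k) hlt]
    · rw [getD_set_ne t (2 + k) j (fun h => hje h.symm), ihv j (by omega)]

theorem norgard_spec : Claim_equal_norgard := by
  intro n _
  unfold Spec_norgard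
  by_cases h0 : n ≤ 0
  · rw [norgard, norgard_alt, if_pos h0, if_pos h0]
  · by_cases h1 : n = 1
    · subst h1; decide
    · have hn2 : 2 ≤ n := by omega
      rw [norgard_alt_eq_map n h0]
      have hmax : (max n 2).toNat = n.toNat := by omega
      have hM2 : 2 ≤ n.toNat := by omega
      set M := n.toNat with hM
      set s2' := if n > 1 then
          PySem.List.pySetD (PySem.List.pySetD (List.replicate (max n 2).toNat (0 : Int)) 0 0) 1 1
        else PySem.List.pySetD (List.replicate (max n 2).toNat (0 : Int)) 0 0 with hs2
      have hs2eq : s2' = ((List.replicate M (0 : Int)).set 0 0).set 1 1 := by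
        rw [hs2, if_pos (by omega), hmax]
        simp [PySem.List.pySetD_of_nonneg]
      have hlen : s2'.length = M := by simp [hs2eq]
      have hv0 : s2'.getD 0 0 = nf 0 := by
        rw [hs2eq, getD_set_ne _ 1 0 (by omega), getD_set_self _ 0 (by simp; omega), nf_zero]
      have hv1 : s2'.getD 1 0 = nf 1 := by
        rw [hs2eq, getD_set_self _ 1 (by simp; omega), nf_one]
      obtain ⟨hfl, hfv⟩ := norgard_inv s2' M hlen hv0 hv1 (M - 2) (by omega)
      have hrk : (n - 2).toNat = M - 2 := by omega
      have hnor : norgard n =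
          PySem.List.slice ((PySem.List.pyRange 2 n 1).foldl norgardStep s2') none (some n) := by
        rw [norgard, if_neg h0]
      rw [hnor, PySem.List.pyRange_one, hrk]
      set t := ((List.range (M - 2)).map (fun j : Nat => ((2 : Int) + j))).foldl norgardStep s2' with htdef
      rw [show PySem.List.slice t none (some n) = t.take n.toNat from PySem.List.slice_to t (by omega)]
      have htake : t.take n.toNat = t := List.take_of_length_le (by omega)
      rw [htake]
      refine List.ext_getElem (by simp [hfl, hM]) (fun j hj1 hj2 => ?_)
      rw [List.getElem_map, List.getElem_range, ← List.getD_eq_getElem t 0 hj1]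
      exact hfv j (by simp at hj2; omega)
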